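-- pv_equiv track=rewrite | github.com/lanseyege/zero-knowledge-proof-work | bulletproof/bulletproof/test/pt3.py | get_delta
-- ===== SOURCE A (Python) =====
-- def get_delta(z, y, lens, p):
--     z2 = z * z #% p
--     z3 = z2 * z #% p
--     _y = 1
--     _tw = 1
--     res1 = 0
--     res2 = 0
--     for i in range(lens):
--         res1 = res1 + _y
--         res2 = res2 + _tw
--
--         _y = _y * y #% p
--         _tw *= 2
--     return ((z-z2) * res1 - z3 * res2) % p
-- ===== SOURCE B (Python) =====
-- def get_delta(z, y, lens, p):
--     n = lens if lens > 0 else 0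
--     z2 = z * z
--     z3 = z2 * z
--     if y == 1:
--         res1 = n
--     else:
--         res1 = (pow(y, n, (y - 1) * p) - 1) // (y - 1)
--     res2 = pow(2, n, p) - 1
--     return ((z - z2) * res1 - z3 * res2) % p
-- ===== Notes on version B (the rewrite author's own statement) =====
-- stated objective: faster
-- what changed: Replaced the O(lens) accumulation loop by closed-form geometric sums: 2^i-sum via pow(2, n, p), y^i-sum via pow(y, n, (y-1)*p) followed by exact division by y-1 (special case y=1 gives n), then the same final combination mod p.
import Mathlib
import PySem

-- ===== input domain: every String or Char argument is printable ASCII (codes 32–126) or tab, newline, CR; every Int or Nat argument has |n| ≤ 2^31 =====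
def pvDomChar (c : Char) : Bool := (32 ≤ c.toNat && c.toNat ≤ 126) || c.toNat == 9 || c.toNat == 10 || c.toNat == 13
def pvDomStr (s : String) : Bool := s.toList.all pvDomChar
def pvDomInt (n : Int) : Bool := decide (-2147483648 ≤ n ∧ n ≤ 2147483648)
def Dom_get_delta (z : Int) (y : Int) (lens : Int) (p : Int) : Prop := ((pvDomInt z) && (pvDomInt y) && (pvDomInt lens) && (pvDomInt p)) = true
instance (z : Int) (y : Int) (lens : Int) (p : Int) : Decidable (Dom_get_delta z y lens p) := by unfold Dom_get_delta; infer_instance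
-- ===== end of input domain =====

-- B replaces A's O(lens) accumulation loop by closed-form geometric sums computed with
-- 3-argument modular pow (modulus (y-1)*p for the y-series), special-casing y = 1.


-- ===== PORT A =====
def get_delta (z : Int) (y : Int) (lens : Int) (p : Int) : Int :=
  let z2 := z * z
  let z3 := z2 * z
  -- state (_y, _tw, res1, res2), updated as in the Python loop body
  let st := (PySem.List.pyRange 0 lens 1).foldl
      (fun (st : Int × Int × Int × Int) (_i : Int) =>
        (st.1 * y, st.2.1 * 2, st.2.2.1 + st.1, st.2.2.2 + st.2.1)) (1, 1, 0, 0)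
  PySem.Int.mod ((z - z2) * st.2.2.1 - z3 * st.2.2.2) p

-- ===== PORT B =====
def get_delta_alt (z : Int) (y : Int) (lens : Int) (p : Int) : Int :=
  let n : Int := if lens > 0 then lens else 0
  let z2 := z * z
  let z3 := z2 * z
  let res1 : Int :=
    if y = 1 then n
    else PySem.Int.floordiv (PySem.Int.powMod y n.toNat ((y - 1) * p) - 1) (y - 1)
  let res2 : Int := PySem.Int.powMod 2 n.toNat p - 1
  PySem.Int.mod ((z - z2) * res1 - z3 * res2) p

-- ===== PRECONDITION & SPEC =====
-- Pre_ excludes exactly p = 0, where A's final '% p' raises ZeroDivisionError.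
def Pre_get_delta (z : Int) (y : Int) (lens : Int) (p : Int) : Prop := p ≠ 0
instance (z : Int) (y : Int) (lens : Int) (p : Int) : Decidable (Pre_get_delta z y lens p) := by unfold Pre_get_delta; infer_instance
def pvWitness_get_delta : Int × Int × Int × Int := (3, 5, 7, 11)
def Spec_get_delta (z : Int) (y : Int) (lens : Int) (p : Int) (out : Int) : Prop := out = get_delta_alt z y lens p
instance (z : Int) (y : Int) (lens : Int) (p : Int) (out : Int) : Decidable (Spec_get_delta z y lens p out) := by unfold Spec_get_delta; infer_instance

-- ===== CLAIM (what is proved, stated in full; the proofs are below) =====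
def Claim_equal_get_delta : Prop := ∀ (z : Int) (y : Int) (lens : Int) (p : Int), Dom_get_delta z y lens p → Pre_get_delta z y lens p → Spec_get_delta z y lens p (get_delta z y lens p)

-- ===== LEMMAS AND PROOFS =====

-- A's loop evaluated on any list of length k, from any start state.
lemma pvLoopEval (y : Int) (l : List Int) (ry rtw r1 r2 : Int) :
    l.foldl (fun (st : Int × Int × Int × Int) (_i : Int) =>
        (st.1 * y, st.2.1 * 2, st.2.2.1 + st.1, st.2.2.2 + st.2.1)) (ry, rtw, r1, r2)
    = (ry * y ^ l.length, rtw * 2 ^ l.length,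
       r1 + ry * ∑ i ∈ Finset.range l.length, y ^ i,
       r2 + rtw * ∑ i ∈ Finset.range l.length, (2:Int) ^ i) := by
  induction l generalizing ry rtw r1 r2 with
  | nil => simp
  | cons x xs ih =>
      rw [List.foldl_cons, ih]
      refine Prod.ext ?_ (Prod.ext ?_ (Prod.ext ?_ ?_)) <;>
        simp [pow_succ, geom_sum_succ] <;> ring

-- Python '%' respects congruence: equal residues give equal fmod.
lemma pvModCongr (a b p : Int) (h : p ∣ a - b) : PySem.Int.mod a p = PySem.Int.mod b p := by
  have he : a % p = b % p :=
    Int.emod_eq_emod_iff_emod_sub_eq_zero.mpr (Int.emod_eq_zero_of_dvd h)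
  have hd : (p ∣ a) ↔ (p ∣ b) := by
    constructor <;> intro hx
    · have := dvd_sub hx h; simpa using this
    · have := dvd_add hx h; simpa using this
  unfold PySem.Int.mod
  rw [Int.fmod_eq_emod, Int.fmod_eq_emod, he]
  by_cases h0 : 0 ≤ p
  · simp [h0]
  · simp [h0, hd]

lemma pvModSubSelf (a p : Int) : p ∣ PySem.Int.mod a p - a :=
  ⟨-(a.fdiv p), by unfold PySem.Int.mod; rw [Int.fmod_def]; ring⟩

theorem get_delta_spec : Claim_equal_get_delta := by
  intro z y lens p _ hp
  unfold Spec_get_delta get_delta get_delta_alt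
  rw [pvLoopEval]
  simp only [PySem.List.length_pyRange_one, Int.sub_zero]
  set k : Nat := lens.toNat with hk
  have hn : (if lens > 0 then lens else 0) = (k : Int) := by
    split <;> omega
  rw [hn]
  have hknat : ((k : Int)).toNat = k := by omega
  rw [hknat]
  set S1 : Int := ∑ i ∈ Finset.range k, y ^ i with hS1
  set S2 : Int := ∑ i ∈ Finset.range k, (2:Int) ^ i with hS2
  -- res2 ≡ S2 (mod p)
  have hg2 : S2 * ((2:Int) - 1) = 2 ^ k - 1 := geom_sum_mul 2 k
  have h2 : p ∣ (PySem.Int.powMod 2 k p - 1) - S2 := by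
    have := pvModSubSelf ((2:Int) ^ k) p
    unfold PySem.Int.powMod
    have hS2' : S2 = 2 ^ k - 1 := by linarith [hg2]
    rw [hS2']
    simpa using this
  obtain ⟨d, hdd⟩ := h2
  -- res1 ≡ S1 (mod p)
  by_cases hy : y = 1
  · have hS1' : S1 = (k : Int) := by simp [hS1, hy]
    simp only [hy, if_pos]
    apply pvModCongr
    refine ⟨z * z * z * d, ?_⟩
    linear_combination (z - z * z) * hS1' + (z * z * z) * hdd
  · simp only [if_neg hy]
    set m : Int := (y - 1) * p with hm
    set t : Int := PySem.Int.powMod y k m with ht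
    obtain ⟨c, hc⟩ : m ∣ t - y ^ k := by
      have := pvModSubSelf (y ^ k) m
      simpa [ht, PySem.Int.powMod] using this
    have hg1 : S1 * (y - 1) = y ^ k - 1 := geom_sum_mul y k
    have hy1 : y - 1 ≠ 0 := fun h => hy (by omega)
    have hres1 : PySem.Int.floordiv (t - 1) (y - 1) = S1 + p * c := by
      have htc : t - 1 = (y - 1) * (S1 + p * c) := by
        have hsplit : t - 1 = (t - y ^ k) + (y ^ k - 1) := by ring
        rw [hsplit, hc, ← hg1, hm]; ring
      rw [htc]
      unfold PySem.Int.floordiv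
      exact Int.mul_fdiv_cancel_left _ hy1
    rw [hres1]
    apply pvModCongr
    refine ⟨(z - z * z) * (-c) + z * z * z * d, ?_⟩
    linear_combination (z * z * z) * hdd
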